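-- pv_equiv track=rewrite | github.com/jasmeetsingh-nfer/Sentences-From-Fragments | read.py | containsNonAlphaNum
-- ===== SOURCE A (Python) =====
-- def containsNonAlphaNum(word_list):
--     """
--     Does list of words contain any special characters?
--
--     Parameters:
--     word_list: list of words
--
--     Returns:
--     bool: whether any word in the list contains a special
--     character
--     """
--     chars = ["-", "_", "."]
--     allow_chars = set(chars)
--     for word in word_list:
--         for char in word:
--             if not(char.isalnum()) and char not in allow_chars:
--                 return True
--     return False
-- ===== SOURCE B (Python) =====
-- def containsNonAlphaNum(word_list):
--     stripped = "".join(word_list)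
--     for ch in "-_.":
--         stripped = stripped.replace(ch, "")
--     return bool(stripped) and not stripped.isalnum()
-- ===== Notes on version B (the rewrite author's own statement) =====
-- stated objective: idiomatic
-- what changed: B joins all words into one string, deletes the three allowed characters with str.replace, and decides the answer with a single whole-string isalnum test on the residue, instead of A's nested word-by-word, char-by-char loop with early return.
import Mathlib
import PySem

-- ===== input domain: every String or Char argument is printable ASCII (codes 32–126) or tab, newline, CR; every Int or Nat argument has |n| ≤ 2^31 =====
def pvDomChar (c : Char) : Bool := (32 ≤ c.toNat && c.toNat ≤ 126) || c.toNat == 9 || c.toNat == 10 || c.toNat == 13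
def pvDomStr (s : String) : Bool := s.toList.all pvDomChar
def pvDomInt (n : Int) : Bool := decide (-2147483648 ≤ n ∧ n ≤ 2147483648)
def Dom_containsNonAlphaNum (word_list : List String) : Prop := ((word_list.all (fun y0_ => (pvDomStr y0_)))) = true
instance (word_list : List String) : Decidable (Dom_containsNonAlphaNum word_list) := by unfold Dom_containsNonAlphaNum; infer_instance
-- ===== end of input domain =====

-- B joins all words into one string, deletes the three allowed characters with str.replace,
-- and decides with one whole-string isalnum test on the residue, instead of A's nested
-- word-by-word, char-by-char loop with early return (objective: idiomatic).

-- ===== PORT A =====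
-- for word in word_list: for char in word: if not char.isalnum() and char not in allow_chars: return True
def containsNonAlphaNum (word_list : List String) : Bool :=
  let allow_chars : PySem.Set Char := PySem.Set.ofList ['-', '_', '.']
  word_list.any (fun word =>
    word.toList.any (fun char =>
      !(PySem.Chars.isalnum char) && !(PySem.Set.contains allow_chars char)))

-- ===== PORT B =====
-- stripped = "".join(word_list); for ch in "-_.": stripped = stripped.replace(ch, "")
-- return bool(stripped) and not stripped.isalnum()
def containsNonAlphaNum_alt (word_list : List String) : Bool :=
  let stripped : String :=
    ("-_.".toList).foldl (fun s ch => PySem.Str.replace s (String.ofList [ch]) "")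
      (PySem.Str.join "" word_list)
  !(stripped == "") && !(PySem.Str.strIsalnum stripped)

-- ===== PRECONDITION & SPEC =====
def Spec_containsNonAlphaNum (word_list : List String) (out : Bool) : Prop := out = containsNonAlphaNum_alt word_list
instance (word_list : List String) (out : Bool) : Decidable (Spec_containsNonAlphaNum word_list out) := by unfold Spec_containsNonAlphaNum; infer_instance

-- ===== CLAIM (what is proved, stated in full; the proofs are below) =====
def Claim_equal_containsNonAlphaNum : Prop := ∀ (word_list : List String), Dom_containsNonAlphaNum word_list → Spec_containsNonAlphaNum word_list (containsNonAlphaNum word_list)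

-- ===== LEMMAS AND PROOFS =====

-- replace.go with a single-char pattern and empty replacement is a filter
theorem pv_go_filter (o : Char) (fuel : Nat) (l acc : List Char) (h : l.length ≤ fuel) :
    PySem.Chars.replace.go [o] [] fuel l acc
      = acc.reverse ++ l.filter (fun c => !(c == o)) := by
  induction fuel generalizing l acc with
  | zero =>
    have : l = [] := List.length_eq_zero_iff.mp (Nat.le_zero.mp h)
    subst this; simp [PySem.Chars.replace.go]
  | succ n ih =>
    cases l with
    | nil => simp [PySem.Chars.replace.go]
    | cons c t =>
      have ht : t.length ≤ n := by simpa using h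
      rw [PySem.Chars.replace.go]
      simp only [List.isPrefixOf, Bool.and_true]
      by_cases hc : c = o
      · subst hc
        simp only [BEq.rfl, if_true]
        have hd : List.drop [c].length (c :: t) = t := by simp
        simp only [hd, List.reverse_nil, List.nil_append]
        rw [ih t acc ht]
        simp
      · have hb : (o == c) = false := by
          simp only [beq_eq_false_iff_ne, ne_eq]
          exact fun h' => hc h'.symm
        rw [hb]
        simp only [Bool.false_eq_true, if_false]
        rw [ih t (c :: acc) ht]
        have hcb : (c == o) = false := by simp [hc]
        simp [hcb]

theorem pv_replace_filter (cs : List Char) (o : Char) :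
    PySem.Chars.replace cs [o] [] = cs.filter (fun c => !(c == o)) := by
  rw [PySem.Chars.replace]
  simp only [List.isEmpty_cons, if_false, Bool.false_eq_true]
  rw [pv_go_filter o cs.length cs [] (le_refl _)]
  simp

theorem pv_intersperse_nil_flatten (parts : List (List Char)) :
    (List.intersperse ([] : List Char) parts).flatten = parts.flatten := by
  induction parts with
  | nil => rfl
  | cons p ps ih =>
    cases ps with
    | nil => rfl
    | cons q qs =>
      simp only [List.intersperse] at ih ⊢
      simp only [List.flatten_cons] at ih ⊢
      simp [ih]

-- the character list of B's residue string
theorem pv_stripped_toList (word_list : List String) :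
    (("-_.".toList).foldl (fun s ch => PySem.Str.replace s (String.ofList [ch]) "")
        (PySem.Str.join "" word_list)).toList
      = ((word_list.map String.toList).flatten).filter
          (fun c => !(c == '-') && !(c == '_') && !(c == '.')) := by
  have hjoin : (PySem.Str.join "" word_list).toList = (word_list.map String.toList).flatten := by
    rw [PySem.Str.toList_join]
    simp [PySem.Chars.join, List.intercalate, pv_intersperse_nil_flatten]
  have hT : ("-_." : String).toList = ['-', '_', '.'] := rfl
  rw [hT]
  simp only [List.foldl_cons, List.foldl_nil]
  rw [PySem.Str.toList_replace, PySem.Str.toList_replace, PySem.Str.toList_replace, hjoin]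
  have h1 : (String.ofList ['-']).toList = ['-'] := rfl
  have h2 : (String.ofList ['_']).toList = ['_'] := rfl
  have h3 : (String.ofList ['.']).toList = ['.'] := rfl
  have h4 : ("" : String).toList = [] := rfl
  rw [h1, h2, h3, h4, pv_replace_filter, pv_replace_filter, pv_replace_filter]
  rw [List.filter_filter, List.filter_filter]
  apply List.filter_congr
  intro c _
  cases hx : (c == '-') <;> cases hy : (c == '_') <;> cases hz : (c == '.') <;> simp_all

-- ===== VERDICT (by name: the statement is the Claim_ definition above) =====
theorem containsNonAlphaNum_spec : Claim_equal_containsNonAlphaNum := by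
  intro word_list _
  unfold Spec_containsNonAlphaNum containsNonAlphaNum containsNonAlphaNum_alt
  apply Bool.eq_iff_iff.mpr
  rw [Bool.and_eq_true, Bool.not_eq_eq_eq_not, Bool.not_eq_eq_eq_not, Bool.not_true,
    PySem.Str.strIsalnum_eq]
  have hL := pv_stripped_toList word_list
  set L := ((word_list.map String.toList).flatten).filter
      (fun c => !(c == '-') && !(c == '_') && !(c == '.')) with hLdef
  rw [hL]
  have hmemL : ∀ c, c ∈ L ↔ (∃ w ∈ word_list, c ∈ w.toList) ∧
      (c == '-') = false ∧ (c == '_') = false ∧ (c == '.') = false := by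
    intro c
    rw [hLdef, List.mem_filter]
    simp only [List.mem_flatten, List.mem_map, Bool.and_eq_true, Bool.not_eq_eq_eq_not,
      Bool.not_true]
    constructor
    · rintro ⟨⟨l, ⟨w, hw, rfl⟩, hc⟩, ⟨ha, hb⟩, hd⟩
      exact ⟨⟨w, hw, hc⟩, ha, hb, hd⟩
    · rintro ⟨⟨w, hw, hc⟩, ha, hb, hd⟩
      exact ⟨⟨w.toList, ⟨w, hw, rfl⟩, hc⟩, ⟨ha, hb⟩, hd⟩
  have hEmpty : (("-_.".toList).foldl (fun s ch => PySem.Str.replace s (String.ofList [ch]) "")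
        (PySem.Str.join "" word_list) == "") = L.isEmpty := by
    cases hE : L.isEmpty
    · have : L ≠ [] := by simpa [List.isEmpty_iff] using hE
      apply beq_eq_false_iff_ne.mpr
      intro hcontra
      apply this
      rw [← hL, hcontra]
      rfl
    · have hnil : L = [] := by simpa [List.isEmpty_iff] using hE
      apply beq_iff_eq.mpr
      apply String.toList_inj.mp
      rw [hL, hnil]
      rfl
  rw [hEmpty]
  constructor
  · intro hA
    simp only [List.any_eq_true, Bool.and_eq_true, Bool.not_eq_eq_eq_not, Bool.not_true] at hA
    obtain ⟨w, hw, c, hc, hal, hcon⟩ := hA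
    simp only [PySem.Set.contains_eq_listContains, List.contains_eq_mem, decide_eq_false_iff_not,
      PySem.Set.mem_ofList, List.mem_cons, List.not_mem_nil, or_false, not_or] at hcon
    have hcmem : c ∈ L := by
      rw [hmemL]
      exact ⟨⟨w, hw, hc⟩, by simp [hcon.1], by simp [hcon.2.1], by simp [hcon.2.2]⟩
    have hLne : L.isEmpty = false := by
      rw [List.isEmpty_eq_false_iff]
      intro h; rw [h] at hcmem; simp at hcmem
    refine ⟨by simp [hLne], ?_⟩
    rw [PySem.Chars.strIsalnum, Bool.and_eq_false_iff]
    right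
    rw [List.all_eq_false]
    exact ⟨c, hcmem, by simp [hal]⟩
  · rintro ⟨hne, hnal⟩
    have hLne : L.isEmpty = false := by simpa using hne
    rw [PySem.Chars.strIsalnum, hLne, Bool.not_false, Bool.true_and, List.all_eq_false] at hnal
    obtain ⟨c, hcL, hcal⟩ := hnal
    rw [hmemL] at hcL
    obtain ⟨⟨w, hw, hcw⟩, ha, hb, hd⟩ := hcL
    simp only [List.any_eq_true, Bool.and_eq_true, Bool.not_eq_eq_eq_not, Bool.not_true]
    refine ⟨w, hw, c, hcw, by simpa using hcal, ?_⟩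
    simp [PySem.Set.contains_eq_listContains, PySem.Set.mem_ofList, beq_eq_false_iff_ne.mp ha,
      beq_eq_false_iff_ne.mp hb, beq_eq_false_iff_ne.mp hd]
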